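-- pv_equiv track=rewrite | github.com/Sagar0-0/DSA | Modified Numbers and Queries.py | sumOfAll
-- ===== SOURCE A (Python) =====
-- from collections import defaultdict
--
-- def sumOfAll(l, r):
--     s=0
--     arr=[True for _ in range(r+1)]
--     d=defaultdict(list)
--     for i in range(2,r+1):
--         if arr[i]:
--             for j in range(2*i,r+1,i):
--                 arr[j]=False
--                 d[j].append(i)
--
--     for i in range(l,r+1):
--         if arr[i]:
--             s+=i
--         else:
--             s+=sum(d[i])
--     return s
-- ===== SOURCE B (Python) =====
-- def sumOfAll(l, r):
--     # swap the order of summation: instead of summing stored factor lists per element,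
--     # count each prime's multiples in the range by floor division
--     if r < l:
--         return 0
--     sieve = [True] * (r + 1)
--     for i in range(2, r + 1):
--         if sieve[i]:
--             for j in range(2 * i, r + 1, i):
--                 sieve[j] = False
--     total = 0
--     for n in range(l, r + 1):
--         if n < 2 or sieve[n]:
--             total += n
--     for p in range(2, r // 2 + 1):
--         if sieve[p]:
--             lo = 2 * p if 2 * p > l else l
--             total += p * (r // p - (lo - 1) // p)
--     return total
-- ===== Notes on version B (the rewrite author's own statement) =====
-- stated objective: faster
-- what changed: B drops A's defaultdict of per-index prime-factor lists and its per-element re-summation: it runs a plain boolean prime sieve and then swaps the order of summation, adding for each prime p the closed-form count of its multiples in the range (r//p - (max(l,2p)-1)//p) times p, so no per-composite data is ever stored or traversed.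
-- outside the precondition, e.g. on sumOfAll(-3, 10): A returns 37, B returns 31; on sumOfAll(-5, 2): A raises IndexError, B returns -12
import Mathlib
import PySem

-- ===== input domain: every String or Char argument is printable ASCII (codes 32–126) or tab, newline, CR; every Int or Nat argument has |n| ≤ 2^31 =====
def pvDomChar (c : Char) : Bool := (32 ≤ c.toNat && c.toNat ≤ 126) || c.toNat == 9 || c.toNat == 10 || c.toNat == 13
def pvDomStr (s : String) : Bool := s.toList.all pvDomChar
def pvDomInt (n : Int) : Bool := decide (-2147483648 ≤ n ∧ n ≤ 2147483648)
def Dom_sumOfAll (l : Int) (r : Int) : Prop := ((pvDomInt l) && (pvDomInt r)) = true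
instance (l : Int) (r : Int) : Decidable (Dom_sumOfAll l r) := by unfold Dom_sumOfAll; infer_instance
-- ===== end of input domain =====

-- B keeps a plain boolean prime sieve but drops A's defaultdict of per-index factor lists and
-- its per-element re-summation: it swaps the order of summation, adding for each prime p a
-- closed-form floor-division count of its multiples in the range; objective: faster (constant factor).

-- ===== PORT A =====
-- Python's xs[i] (negative index from the end; none = IndexError) on an Array —
-- exact: PySem.List.pyIdx? is PySem's own index resolution, applied to the array's size.
def pvGetA {α : Type} (xs : Array α) (i : Int) : Option α :=
  (PySem.List.pyIdx? xs.size i).bind (fun k => xs[k]?)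

-- defaultdict(list) read d[j]: the dict's keys are exactly the marked indices 0 ≤ j ≤ r,
-- stored at slot j; any never-inserted key (negative, or beyond r) reads [] — exact.
def pvDGet (d : Array (List Int)) (j : Int) : List Int :=
  if 0 ≤ j then (d[j.toNat]?).getD [] else []

-- inner loop body: arr[j] = False; d[j].append(i)
def pvMarkA (i : Int) (st : Array Bool × Array (List Int)) (j : Int) :
    Array Bool × Array (List Int) :=
  (st.1.setIfInBounds j.toNat false, st.2.setIfInBounds j.toNat (pvDGet st.2 j ++ [i]))

-- outer loop body: if arr[i]: for j in range(2*i, r+1, i): …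
def pvSieveA (r : Int) (st : Array Bool × Array (List Int)) (i : Int) :
    Array Bool × Array (List Int) :=
  if (pvGetA st.1 i).getD false then
    (PySem.List.pyRange (2 * i) (r + 1) i).foldl (pvMarkA i) st
  else st

def sumOfAll (l : Int) (r : Int) : Int :=
  -- arr = [True]*(r+1); d = defaultdict(list); sieve loop
  let st := (PySem.List.pyRange 2 (r + 1) 1).foldl (pvSieveA r)
      (Array.replicate (r + 1).toNat true, Array.replicate (r + 1).toNat ([] : List Int))
  -- output loop: s += i if arr[i] else sum(d[i]); arr[i] is in range on every input Pre_ admits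
  (PySem.List.pyRange l (r + 1) 1).foldl
    (fun s i => if (pvGetA st.1 i).getD false then s + i
                else s + (pvDGet st.2 i).sum) 0

-- ===== PORT B =====
-- inner loop body: sieve[j] = False
def pvMarkB (st : Array Bool) (j : Int) : Array Bool := st.setIfInBounds j.toNat false

-- outer sieve-loop body: if sieve[i]: for j in range(2*i, r+1, i): sieve[j] = False
def pvSieveB (r : Int) (st : Array Bool) (i : Int) : Array Bool :=
  if (pvGetA st i).getD false then (PySem.List.pyRange (2 * i) (r + 1) i).foldl pvMarkB st
  else st

def sumOfAll_alt (l : Int) (r : Int) : Int :=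
  if r < l then 0
  else
    -- sieve = [True]*(r+1); plain prime sieve
    let sieve := (PySem.List.pyRange 2 (r + 1) 1).foldl (pvSieveB r)
      (Array.replicate (r + 1).toNat true)
    -- total += n for n in [l,r] with n < 2 or sieve[n]
    let t1 := (PySem.List.pyRange l (r + 1) 1).foldl
      (fun t n => if n < 2 || (pvGetA sieve n).getD false then t + n else t) 0
    -- for p in [2, r//2]: if sieve[p]: total += p * (r//p - (max(l,2p)-1)//p)
    (PySem.List.pyRange 2 (PySem.Int.floordiv r 2 + 1) 1).foldl
      (fun t p => if (pvGetA sieve p).getD false then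
          t + p * (PySem.Int.floordiv r p
            - PySem.Int.floordiv ((if 2 * p > l then 2 * p else l) - 1) p)
        else t) t1

-- ===== PRECONDITION & SPEC =====
-- Pre_ restricts to the problem's natural domain (ranges of non-negative integers, or an empty
-- range): it excludes nonempty ranges starting below 0, where A's output-loop read arr[i] either
-- raises IndexError (l < -(r+1)) or wraps the negative index to arr[r+1+i], an accident of the
-- list representation outside the intended queries.
def Pre_sumOfAll (l : Int) (r : Int) : Prop := 0 ≤ l ∨ r < l
instance (l : Int) (r : Int) : Decidable (Pre_sumOfAll l r) := by unfold Pre_sumOfAll; infer_instance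
def pvWitness_sumOfAll : Int × Int := (2, 10)

def Spec_sumOfAll (l : Int) (r : Int) (out : Int) : Prop := out = sumOfAll_alt l r
instance (l : Int) (r : Int) (out : Int) : Decidable (Spec_sumOfAll l r out) := by unfold Spec_sumOfAll; infer_instance

-- ===== CLAIM (what is proved, stated in full; the proofs are below) =====
def Claim_equal_sumOfAll : Prop := ∀ (l : Int) (r : Int), Dom_sumOfAll l r → Pre_sumOfAll l r → Spec_sumOfAll l r (sumOfAll l r)

-- ===== LEMMAS AND PROOFS =====

-- the common mathematical value of one range element: itself below 2, else the sum of its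
-- distinct prime factors (for a prime that sum is the number itself)
def pvF (x : Int) : Int :=
  if x < 2 then x else ∑ q ∈ x.toNat.primeFactors, (q : Int)

-- "x is already struck off after sieve rounds 2..k": some prime factor q ≤ k with 2q ≤ x
def pvMarked (k x : Int) : Prop :=
  ∃ q ∈ x.toNat.primeFactors, (q : Int) ≤ k ∧ 2 * (q : Int) ≤ x

-- the value sum(d[x]) holds after sieve rounds 2..k
def pvDSum (k x : Int) : Int :=
  ∑ q ∈ Finset.filter (fun q : Nat => (q : Int) ≤ k ∧ 2 * (q : Int) ≤ x) x.toNat.primeFactors, (q : Int)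

-- the sieve-loop invariant after rounds 2..k
def pvSInv (r k : Int) (st : Array Bool × Array (List Int)) : Prop :=
  st.1.size = (r + 1).toNat ∧ st.2.size = (r + 1).toNat ∧
  (∀ x : Int, 0 ≤ x → x ≤ r → ((pvGetA st.1 x).getD false = true ↔ ¬ pvMarked k x)) ∧
  (∀ x : Int, 0 ≤ x → x ≤ r → (pvDGet st.2 x).sum = pvDSum k x)

theorem pvGetA_eq_getElem? {α : Type} (xs : Array α) (x : Int)
    (h0 : 0 ≤ x) (hx : x < (xs.size : Int)) : pvGetA xs x = xs[x.toNat]? := by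
  simp [pvGetA, PySem.List.pyIdx?, h0, hx]

theorem pvMemPF (x : Int) (hx : 0 ≤ x) (q : Nat) :
    q ∈ x.toNat.primeFactors ↔ q.Prime ∧ (q : Int) ∣ x ∧ x ≠ 0 := by
  rw [Nat.mem_primeFactors]
  have hXx : ((x.toNat : Int)) = x := Int.toNat_of_nonneg hx
  constructor
  · rintro ⟨h1, h2, h3⟩
    exact ⟨h1, by rw [← hXx]; exact_mod_cast h2, by omega⟩
  · rintro ⟨h1, h2, h3⟩
    refine ⟨h1, ?_, by omega⟩
    have : (q : Int) ∣ (x.toNat : Int) := hXx ▸ h2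
    exact_mod_cast this

theorem pvMarked_compose (x : Int) (h2 : 2 ≤ x) (hnp : ¬ x.toNat.Prime) (k : Int)
    (hk : x - 1 ≤ k) : pvMarked k x := by
  have hXx : ((x.toNat : Int)) = x := Int.toNat_of_nonneg (by omega)
  set q := x.toNat.minFac with hq
  have hqp : q.Prime := Nat.minFac_prime (by omega)
  have hqd : q ∣ x.toNat := Nat.minFac_dvd _
  have hsq : q ^ 2 ≤ x.toNat := Nat.minFac_sq_le_self (by omega) hnp
  have hsq' : (q : Int) ^ 2 ≤ x := by rw [← hXx]; exact_mod_cast hsq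
  have h2q : 2 ≤ (q : Int) := by exact_mod_cast hqp.two_le
  have h2qx : 2 * (q : Int) ≤ x := by nlinarith
  refine ⟨q, (pvMemPF x (by omega) q).mpr ⟨hqp, by rw [← hXx]; exact_mod_cast hqd, by omega⟩,
    by nlinarith, h2qx⟩

theorem pvMarked_iff_at_self (i : Int) (h2 : 2 ≤ i) :
    pvMarked (i - 1) i ↔ ¬ i.toNat.Prime := by
  have hIi : ((i.toNat : Int)) = i := Int.toNat_of_nonneg (by omega)
  constructor
  · rintro ⟨q, hmem, hql, hq2⟩ hp
    rw [hp.primeFactors, Finset.mem_singleton] at hmem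
    subst hmem
    omega
  · intro hnp
    exact pvMarked_compose i h2 hnp (i - 1) (by omega)

theorem pvMarked_succ (i x : Int) (hi : 2 ≤ i) (hx : 0 ≤ x) (hp : i.toNat.Prime) :
    pvMarked i x ↔ pvMarked (i - 1) x ∨ (i ∣ x ∧ 2 * i ≤ x) := by
  have hIi : ((i.toNat : Int)) = i := Int.toNat_of_nonneg (by omega)
  constructor
  · rintro ⟨q, hmem, hql, hq2⟩
    by_cases hqi : (q : Int) = i
    · right
      obtain ⟨-, hdvd, -⟩ := (pvMemPF x hx q).mp hmem
      exact ⟨hqi ▸ hdvd, by omega⟩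
    · left; exact ⟨q, hmem, by omega, hq2⟩
  · rintro (⟨q, hmem, hql, hq2⟩ | ⟨hdvd, h2i⟩)
    · exact ⟨q, hmem, by omega, hq2⟩
    · refine ⟨i.toNat, (pvMemPF x hx i.toNat).mpr ⟨hp, hIi ▸ hdvd, by omega⟩, by omega, by omega⟩

theorem pvMarked_not_prime (i x : Int) (hi : 2 ≤ i) (hx : 0 ≤ x) (hnp : ¬ i.toNat.Prime) :
    pvMarked i x ↔ pvMarked (i - 1) x := by
  have hIi : ((i.toNat : Int)) = i := Int.toNat_of_nonneg (by omega)
  constructor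
  · rintro ⟨q, hmem, hql, hq2⟩
    have hqp : q.Prime := ((pvMemPF x hx q).mp hmem).1
    have hqi : q ≠ i.toNat := by rintro rfl; exact hnp hqp
    have : (q : Int) ≠ i := by rw [← hIi]; exact_mod_cast hqi
    exact ⟨q, hmem, by omega, hq2⟩
  · rintro ⟨q, hmem, hql, hq2⟩
    exact ⟨q, hmem, by omega, hq2⟩

theorem pvDSum_succ (i x : Int) (hi : 2 ≤ i) (hx : 0 ≤ x) (hp : i.toNat.Prime) :
    pvDSum i x = pvDSum (i - 1) x + (if i ∣ x ∧ 2 * i ≤ x then i else 0) := by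
  have hIi : ((i.toNat : Int)) = i := Int.toNat_of_nonneg (by omega)
  rw [pvDSum, pvDSum, Finset.sum_filter, Finset.sum_filter]
  have hpt : ∀ q ∈ x.toNat.primeFactors,
      (if (q : Int) ≤ i ∧ 2 * (q : Int) ≤ x then (q : Int) else 0)
        = (if (q : Int) ≤ i - 1 ∧ 2 * (q : Int) ≤ x then (q : Int) else 0)
          + (if q = i.toNat then (if 2 * (q : Int) ≤ x then (q : Int) else 0) else 0) := by
    intro q _
    by_cases hqi : q = i.toNat
    · subst hqi
      rw [hIi]
      rw [if_pos rfl]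
      split_ifs <;> omega
    · have : (q : Int) ≠ i := by rw [← hIi]; exact_mod_cast hqi
      have heq : ((q : Int) ≤ i ∧ 2 * (q : Int) ≤ x) ↔ ((q : Int) ≤ i - 1 ∧ 2 * (q : Int) ≤ x) := by
        omega
      simp [hqi, heq]
  rw [Finset.sum_congr rfl hpt, Finset.sum_add_distrib, Finset.sum_ite_eq']
  congr 1
  by_cases hmem : i.toNat ∈ x.toNat.primeFactors
  · obtain ⟨-, hdvd, hx0⟩ := (pvMemPF x hx i.toNat).mp hmem
    simp [hmem, hIi, show (i ∣ x ∧ 2 * i ≤ x) ↔ 2 * i ≤ x from ⟨fun h => h.2, fun h => ⟨hIi ▸ hdvd, h⟩⟩]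
  · have hni : ¬ (i ∣ x ∧ 2 * i ≤ x) := by
      rintro ⟨hdvd, h2i⟩
      exact hmem ((pvMemPF x hx i.toNat).mpr ⟨hp, hIi ▸ hdvd, by omega⟩)
    simp [hmem, hni]

theorem pvDSum_not_prime (i x : Int) (hi : 2 ≤ i) (hx : 0 ≤ x) (hnp : ¬ i.toNat.Prime) :
    pvDSum i x = pvDSum (i - 1) x := by
  have hIi : ((i.toNat : Int)) = i := Int.toNat_of_nonneg (by omega)
  rw [pvDSum, pvDSum]
  apply Finset.sum_congr _ (fun _ _ => rfl)
  apply Finset.filter_congr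
  intro q hq
  have hqp : q.Prime := ((pvMemPF x hx q).mp hq).1
  have hqi : q ≠ i.toNat := by rintro rfl; exact hnp hqp
  have : (q : Int) ≠ i := by rw [← hIi]; exact_mod_cast hqi
  constructor <;> rintro ⟨h1, h2⟩ <;> exact ⟨by omega, h2⟩

theorem pvMark_read (i : Int) (st : Array Bool × Array (List Int)) (j : Int)
    (h0 : 0 ≤ j) (hj : j < (st.1.size : Int)) (hsz : st.2.size = st.1.size) :
    (pvMarkA i st j).1.size = st.1.size ∧ (pvMarkA i st j).2.size = st.2.size ∧
    (∀ x : Int, 0 ≤ x → x < (st.1.size : Int) →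
      pvGetA (pvMarkA i st j).1 x = if x = j then some false else pvGetA st.1 x) ∧
    (∀ x : Int, 0 ≤ x →
      (pvDGet (pvMarkA i st j).2 x).sum = (pvDGet st.2 x).sum + if x = j then i else 0) := by
  refine ⟨Array.size_setIfInBounds .., Array.size_setIfInBounds .., ?_, ?_⟩
  · intro x hx0 hxlt
    rw [pvGetA_eq_getElem? _ x hx0 (by simpa [pvMarkA, Array.size_setIfInBounds] using hxlt),
      pvGetA_eq_getElem? _ x hx0 hxlt]
    show (st.1.setIfInBounds j.toNat false)[x.toNat]? = _
    rw [Array.getElem?_setIfInBounds]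
    by_cases hxj : x = j
    · subst hxj
      rw [if_pos rfl, if_pos (by omega), if_pos rfl]
    · rw [if_neg (by omega), if_neg hxj]
  · intro x hx0
    show (pvDGet (st.2.setIfInBounds j.toNat (pvDGet st.2 j ++ [i])) x).sum = _
    by_cases hxj : x = j
    · subst hxj
      rw [if_pos rfl]
      simp only [pvDGet, if_pos hx0]
      rw [Array.getElem?_setIfInBounds, if_pos rfl, if_pos (by omega)]
      simp
    · rw [if_neg hxj]
      simp only [pvDGet, if_pos hx0]
      rw [Array.getElem?_setIfInBounds, if_neg (by omega)]
      simp

theorem pvMarkFold (i : Int) :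
    ∀ (ms : List Int) (st : Array Bool × Array (List Int)),
    (∀ j ∈ ms, 0 ≤ j ∧ j < (st.1.size : Int)) → ms.Nodup → st.2.size = st.1.size →
    (ms.foldl (pvMarkA i) st).1.size = st.1.size ∧
    (ms.foldl (pvMarkA i) st).2.size = st.2.size ∧
    (∀ x : Int, 0 ≤ x → x < (st.1.size : Int) →
      pvGetA (ms.foldl (pvMarkA i) st).1 x = if x ∈ ms then some false else pvGetA st.1 x) ∧
    (∀ x : Int, 0 ≤ x → x < (st.1.size : Int) →
      (pvDGet (ms.foldl (pvMarkA i) st).2 x).sum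
        = (pvDGet st.2 x).sum + if x ∈ ms then i else 0) := by
  intro ms
  induction ms with
  | nil => intro st _ _ _; simp
  | cons y ys ih =>
    intro st hms hnd hsz
    have hy := hms y (List.mem_cons_self ..)
    obtain ⟨m1, m2, mr, md⟩ := pvMark_read i st y hy.1 hy.2 hsz
    have hms' : ∀ j ∈ ys, 0 ≤ j ∧ j < ((pvMarkA i st y).1.size : Int) := by
      intro j hj
      have := hms j (List.mem_cons_of_mem _ hj)
      omega
    obtain ⟨f1, f2, fr, fd⟩ := ih (pvMarkA i st y) hms' hnd.of_cons (by omega)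
    have hyny : y ∉ ys := (List.nodup_cons.mp hnd).1
    refine ⟨by simp only [List.foldl_cons]; omega, by simp only [List.foldl_cons]; omega, ?_, ?_⟩
    · intro x hx0 hxlt
      simp only [List.foldl_cons]
      rw [fr x hx0 (by omega), mr x hx0 hxlt]
      by_cases hxy : x = y
      · subst hxy
        simp [hyny, List.mem_cons]
      · by_cases hxys : x ∈ ys <;> simp [hxys, hxy, List.mem_cons]
    · intro x hx0 hxlt
      simp only [List.foldl_cons]
      rw [fd x hx0 (by omega), md x hx0]
      by_cases hxy : x = y
      · subst hxy
        simp [hyny, List.mem_cons]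
      · by_cases hxys : x ∈ ys <;> simp [hxys, hxy, List.mem_cons]

theorem pvNodup_pyRange_pos (a b s : Int) (hs : 0 < s) : (PySem.List.pyRange a b s).Nodup := by
  rw [PySem.List.pyRange_of_pos a b hs]
  exact List.Nodup.map (fun k1 k2 h => by
    have : s * (k1 : Int) = s * (k2 : Int) := by omega
    have := mul_left_cancel₀ (by omega : s ≠ 0) this
    exact_mod_cast this) List.nodup_range

theorem pvSieveA_step (r i : Int) (h2 : 2 ≤ i) (hir : i ≤ r)
    (st : Array Bool × Array (List Int)) (hinv : pvSInv r (i - 1) st) :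
    pvSInv r i (pvSieveA r st i) := by
  obtain ⟨sz1, sz2, harr, hd⟩ := hinv
  have hri : ((r + 1).toNat : Int) = r + 1 := Int.toNat_of_nonneg (by omega)
  have hread := harr i (by omega) hir
  rw [pvMarked_iff_at_self i h2] at hread
  by_cases hp : i.toNat.Prime
  · -- arr[i] is True: mark all multiples
    have htrue : (pvGetA st.1 i).getD false = true := hread.mpr (by simpa using hp)
    have hms : ∀ j ∈ PySem.List.pyRange (2 * i) (r + 1) i, 0 ≤ j ∧ j < (st.1.size : Int) := by
      intro j hj
      obtain ⟨hj1, hj2, -⟩ := (PySem.List.mem_pyRange_iff_of_pos (by omega) j).mp hj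
      constructor <;> omega
    obtain ⟨f1, f2, fr, fd⟩ := pvMarkFold i (PySem.List.pyRange (2 * i) (r + 1) i) st hms
      (pvNodup_pyRange_pos _ _ _ (by omega)) (by omega)
    have hmem : ∀ x : Int, 0 ≤ x → x ≤ r →
        (x ∈ PySem.List.pyRange (2 * i) (r + 1) i ↔ (i ∣ x ∧ 2 * i ≤ x)) := by
      intro x hx0 hxr
      rw [PySem.List.mem_pyRange_iff_of_pos (by omega) x]
      constructor
      · rintro ⟨ha, hb, hc⟩
        refine ⟨?_, ha⟩
        have : i ∣ x - 2 * i := hc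
        have h2i : i ∣ 2 * i := ⟨2, by ring⟩
        simpa using dvd_add this h2i
      · rintro ⟨ha, hb⟩
        exact ⟨hb, by omega, by simpa using dvd_sub ha ⟨2, by ring⟩⟩
    rw [pvSieveA, if_pos htrue]
    refine ⟨by omega, by omega, ?_, ?_⟩
    · intro x hx0 hxr
      rw [fr x hx0 (by omega), pvMarked_succ i x h2 hx0 hp]
      by_cases hin : x ∈ PySem.List.pyRange (2 * i) (r + 1) i
      · simp only [hin, if_pos]
        simp only [Option.getD_some]
        constructor
        · intro h; exact absurd h (by simp)
        · intro h
          exact absurd (Or.inr ((hmem x hx0 hxr).mp hin)) h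
      · rw [if_neg hin, harr x hx0 hxr]
        have : ¬ (i ∣ x ∧ 2 * i ≤ x) := fun h => hin ((hmem x hx0 hxr).mpr h)
        tauto
    · intro x hx0 hxr
      rw [fd x hx0 (by omega), hd x hx0 hxr, pvDSum_succ i x h2 hx0 hp]
      congr 1
      by_cases hin : x ∈ PySem.List.pyRange (2 * i) (r + 1) i
      · rw [if_pos hin, if_pos ((hmem x hx0 hxr).mp hin)]
      · rw [if_neg hin, if_neg (fun h => hin ((hmem x hx0 hxr).mpr h))]
  · -- arr[i] is False: state unchanged
    have hfalse : ¬ ((pvGetA st.1 i).getD false = true) := fun h => by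
      have := hread.mp h; simp_all
    rw [pvSieveA, if_neg (by simpa using hfalse)]
    refine ⟨sz1, sz2, ?_, ?_⟩
    · intro x hx0 hxr
      rw [harr x hx0 hxr, pvMarked_not_prime i x h2 hx0 hp]
    · intro x hx0 hxr
      rw [hd x hx0 hxr, pvDSum_not_prime i x h2 hx0 hp]

theorem pvSInv_init (r : Int) :
    pvSInv r 1 (Array.replicate (r + 1).toNat true, Array.replicate (r + 1).toNat ([] : List Int)) := by
  refine ⟨Array.size_replicate, Array.size_replicate, ?_, ?_⟩
  · intro x hx0 hxr
    have hlt : x < ((Array.replicate (r + 1).toNat true).size : Int) := by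
      simp [Array.size_replicate]; omega
    rw [pvGetA_eq_getElem? _ x hx0 hlt]
    simp only [Array.getElem?_replicate]
    rw [if_pos (by simp [Array.size_replicate] at hlt; omega)]
    simp only [Option.getD_some, true_iff]
    rintro ⟨q, hmem, hql, -⟩
    have hqp : q.Prime := ((pvMemPF x hx0 q).mp hmem).1
    have : (2 : Int) ≤ (q : Int) := by exact_mod_cast hqp.two_le
    omega
  · intro x hx0 hxr
    have : pvDGet (Array.replicate (r + 1).toNat ([] : List Int)) x = [] := by
      simp only [pvDGet, if_pos hx0, Array.getElem?_replicate]
      split_ifs <;> simp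
    rw [this, pvDSum]
    have : Finset.filter (fun q : Nat => (q : Int) ≤ 1 ∧ 2 * (q : Int) ≤ x) x.toNat.primeFactors = ∅ := by
      apply Finset.filter_false_of_mem
      intro q hq
      have hqp : q.Prime := ((pvMemPF x hx0 q).mp hq).1
      have : (2 : Int) ≤ (q : Int) := by exact_mod_cast hqp.two_le
      rintro ⟨h1, -⟩
      omega
    rw [this]
    simp

theorem pvSInv_fold (r : Int) : ∀ (n : Nat) (k : Int), k = 1 + (n : Int) → k ≤ r →
    pvSInv r k ((PySem.List.pyRange 2 (k + 1) 1).foldl (pvSieveA r)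
      (Array.replicate (r + 1).toNat true, Array.replicate (r + 1).toNat ([] : List Int))) := by
  intro n
  induction n with
  | zero =>
    intro k hk hkr
    subst hk
    rw [show ((1 : Int) + (0 : Nat) + 1) = 2 by norm_num, PySem.List.pyRange_one_eq_nil (by omega)]
    simpa using pvSInv_init r
  | succ n ih =>
    intro k hk hkr
    have hk1 : k - 1 = 1 + (n : Int) := by push_cast at hk ⊢; omega
    have h2k : 2 ≤ k := by push_cast at hk; omega
    rw [show k + 1 = (k - 1 + 1) + 1 by ring,
      PySem.List.pyRange_one_succ_right (by omega), List.foldl_append]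
    simp only [List.foldl_cons, List.foldl_nil]
    rw [show k - 1 + 1 = k by ring]
    exact pvSieveA_step r k h2k hkr _ (by
      have := ih (k - 1) hk1 (by omega)
      rwa [show k - 1 + 1 = k by ring] at this)

theorem pvA_summand (r k : Int) (st : Array Bool × Array (List Int)) (hinv : pvSInv r k st)
    (hk : r - 1 ≤ k) (x : Int) (h0 : 0 ≤ x) (hx : x ≤ r) :
    (if (pvGetA st.1 x).getD false then x else (pvDGet st.2 x).sum) = pvF x := by
  obtain ⟨sz1, sz2, harr, hd⟩ := hinv
  have hXx : ((x.toNat : Int)) = x := Int.toNat_of_nonneg h0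
  by_cases h2 : x < 2
  · -- 0 and 1 are never marked
    have hpf : x.toNat.primeFactors = ∅ := by
      interval_cases x <;> simp
    have : (pvGetA st.1 x).getD false = true := (harr x h0 hx).mpr (by
      rintro ⟨q, hmem, -⟩; simp [hpf] at hmem)
    rw [if_pos this, pvF, if_pos h2]
  · by_cases hp : x.toNat.Prime
    · have : (pvGetA st.1 x).getD false = true := (harr x h0 hx).mpr (by
        rintro ⟨q, hmem, -, hq2⟩
        rw [hp.primeFactors, Finset.mem_singleton] at hmem
        subst hmem
        omega)
      rw [if_pos this, pvF, if_neg h2, hp.primeFactors]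
      simp [hXx]
    · have hmk : pvMarked k x := pvMarked_compose x (by omega) hp k (by omega)
      have : ¬ ((pvGetA st.1 x).getD false = true) := fun h => (harr x h0 hx).mp h hmk
      rw [if_neg (by simpa using this), hd x h0 hx, pvDSum, pvF, if_neg h2]
      apply Finset.sum_congr _ (fun _ _ => rfl)
      apply Finset.filter_true_of_mem
      intro q hq
      obtain ⟨hqp, hqd, -⟩ := (pvMemPF x h0 q).mp hq
      have h2q : (2 : Int) ≤ (q : Int) := by exact_mod_cast hqp.two_le
      have hqn : (q : Int) ≠ x := by
        rintro h
        rw [← hXx] at h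
        exact hp (by rwa [Nat.cast_injective h] at hqp)
      obtain ⟨c, hc⟩ := hqd
      have hcpos : 0 < c := by nlinarith
      have hc1 : c ≠ 1 := fun h => hqn (by rw [h, mul_one] at hc; omega)
      have hc2 : 2 ≤ c := by omega
      have h2qx : 2 * (q : Int) ≤ x := by nlinarith
      exact ⟨by omega, h2qx⟩


-- the composite contribution of one element: sum of its prime factors q with 2q ≤ x
def pvC (x : Int) : Int :=
  ∑ q ∈ Finset.filter (fun q : Nat => 2 * (q : Int) ≤ x) x.toNat.primeFactors, (q : Int)

-- B's sieve-loop invariant after rounds 2..k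
def pvSBInv (r k : Int) (st : Array Bool) : Prop :=
  st.size = (r + 1).toNat ∧
  (∀ x : Int, 0 ≤ x → x ≤ r → ((pvGetA st x).getD false = true ↔ ¬ pvMarked k x))

theorem pvEdivStep (p b : Int) (hp : 0 < p) :
    b / p - (b - 1) / p = if p ∣ b then 1 else 0 := by
  by_cases hd : p ∣ b
  · obtain ⟨q, hq⟩ := hd
    subst hq
    rw [Int.mul_ediv_cancel_left _ (by omega)]
    have : (p * q - 1) / p = q - 1 := by
      rw [show p * q - 1 = (p - 1) + p * (q - 1) by ring,
        Int.add_mul_ediv_left _ _ (show p ≠ 0 by omega), Int.ediv_eq_zero_of_lt (by omega) (by omega)]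
      ring
    rw [this, if_pos ⟨q, rfl⟩]
    ring
  · rw [if_neg hd]
    have hmod : 0 < b % p := by
      have h1 : 0 ≤ b % p := Int.emod_nonneg b (by omega)
      have h2 : b % p ≠ 0 := fun h => hd (Int.dvd_of_emod_eq_zero h)
      omega
    have hq : b = p * (b / p) + b % p := (Int.ediv_add_emod b p).symm
    have : (b - 1) / p = b / p := by
      rw [show b - 1 = (b % p - 1) + p * (b / p) by omega,
        Int.add_mul_ediv_left _ _ (show p ≠ 0 by omega),
        Int.ediv_eq_zero_of_lt (by omega) (by have := Int.emod_lt_of_pos b hp; omega)]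
      ring
    omega

theorem pvCountMul (p : Int) (hp : 0 < p) : ∀ (n : Nat) (a b : Int), (b + 1 - a).toNat = n →
    a ≤ b + 1 →
    ((PySem.List.pyRange a (b + 1) 1).map (fun x => if p ∣ x then p else 0)).sum
      = p * (b / p - (a - 1) / p) := by
  intro n
  induction n with
  | zero =>
    intro a b hn ha
    have hab : a = b + 1 := by omega
    subst hab
    rw [PySem.List.pyRange_one_eq_nil (by omega)]
    simp [show b + 1 - 1 = b by ring]
  | succ n ih =>
    intro a b hn ha
    have hab : a ≤ b := by omega
    rw [PySem.List.pyRange_one_succ_right hab, List.map_append, List.sum_append]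
    have := ih a (b - 1) (by omega) (by omega)
    rw [show b - 1 + 1 = b by ring] at this
    rw [this]
    have hstep := pvEdivStep p b hp
    by_cases hd : p ∣ b
    · rw [if_pos hd] at hstep
      simp only [List.map_cons, List.map_nil, List.sum_cons, List.sum_nil, if_pos hd]
      nlinarith [hstep]
    · rw [if_neg hd] at hstep
      simp only [List.map_cons, List.map_nil, List.sum_cons, List.sum_nil, if_neg hd]
      nlinarith [hstep]

theorem pvPrimeTerm (p l r : Int) (hp2 : 2 ≤ p) (h2pr : 2 * p ≤ r) (hl0 : 0 ≤ l) (hlr : l ≤ r) :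
    ((PySem.List.pyRange l (r + 1) 1).map (fun n => if (p ∣ n ∧ 2 * p ≤ n) then p else 0)).sum
      = p * (r / p - ((if 2 * p > l then 2 * p else l) - 1) / p) := by
  set mx := if 2 * p > l then 2 * p else l with hmx
  have hlmx : l ≤ mx := by rw [hmx]; split <;> omega
  have hmxr : mx ≤ r + 1 := by rw [hmx]; split <;> omega
  rw [PySem.List.pyRange_one_append l mx (r + 1) hlmx hmxr, List.map_append, List.sum_append]
  have h1 : ((PySem.List.pyRange l mx 1).map (fun n => if (p ∣ n ∧ 2 * p ≤ n) then p else 0)).sum = 0 := by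
    have : ∀ n ∈ PySem.List.pyRange l mx 1, (if (p ∣ n ∧ 2 * p ≤ n) then p else 0) = 0 := by
      intro n hn
      obtain ⟨hn1, hn2⟩ := PySem.List.mem_pyRange_one.mp hn
      rw [if_neg]
      rintro ⟨-, hc⟩
      rw [hmx] at hn2
      split at hn2 <;> omega
    rw [List.map_congr_left this]
    simp
  have h2 : ((PySem.List.pyRange mx (r + 1) 1).map (fun n => if (p ∣ n ∧ 2 * p ≤ n) then p else 0)).sum
      = ((PySem.List.pyRange mx (r + 1) 1).map (fun n => if p ∣ n then p else 0)).sum := by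
    apply congrArg List.sum
    apply List.map_congr_left
    intro n hn
    obtain ⟨hn1, hn2⟩ := PySem.List.mem_pyRange_one.mp hn
    have h2pn : 2 * p ≤ n := by rw [hmx] at hn1; split at hn1 <;> omega
    by_cases hd : p ∣ n
    · rw [if_pos ⟨hd, h2pn⟩, if_pos hd]
    · rw [if_neg (fun h => hd h.1), if_neg hd]
  rw [h1, h2, pvCountMul p (by omega) (r + 1 - mx).toNat mx r rfl (by omega), zero_add]

theorem pvSumSwap (outer inner : List Int) (g : Int → Int → Int) :
    (outer.map (fun n => (inner.map (fun p => g p n)).sum)).sum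
      = (inner.map (fun p => (outer.map (fun n => g p n)).sum)).sum := by
  induction outer with
  | nil => simp
  | cons y ys ih =>
    simp only [List.map_cons, List.sum_cons, ih]
    rw [← PySem.List.sum_map_add_int]

theorem pvC_full (x : Int) (h2 : 2 ≤ x) (hnp : ¬ x.toNat.Prime) :
    pvC x = ∑ q ∈ x.toNat.primeFactors, (q : Int) := by
  have hXx : ((x.toNat : Int)) = x := Int.toNat_of_nonneg (by omega)
  rw [pvC]
  apply Finset.sum_congr _ (fun _ _ => rfl)
  apply Finset.filter_true_of_mem
  intro q hq
  obtain ⟨hqp, hqd, -⟩ := pvMemPF x (by omega) q |>.mp hq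
  have h2q : (2 : Int) ≤ (q : Int) := by exact_mod_cast hqp.two_le
  have hqn : (q : Int) ≠ x := by
    rintro h
    rw [← hXx] at h
    exact hnp (by rwa [Nat.cast_injective h] at hqp)
  obtain ⟨c, hc⟩ := hqd
  have hcpos : 0 < c := by nlinarith
  have hc1 : c ≠ 1 := fun h => hqn (by rw [h, mul_one] at hc; omega)
  have hc2 : 2 ≤ c := by omega
  nlinarith

theorem pvF_split (x : Int) (hx0 : 0 ≤ x) :
    pvF x = (if x < 2 ∨ x.toNat.Prime then x else 0) + pvC x := by
  by_cases h2 : x < 2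
  · have hpf : x.toNat.primeFactors = ∅ := by interval_cases x <;> simp
    rw [pvF, if_pos h2, if_pos (Or.inl h2), pvC, hpf]
    simp
  · by_cases hp : x.toNat.Prime
    · have hXx : ((x.toNat : Int)) = x := Int.toNat_of_nonneg (by omega)
      rw [pvF, if_neg h2, if_pos (Or.inr hp), hp.primeFactors, pvC, hp.primeFactors]
      have : Finset.filter (fun q : Nat => 2 * (q : Int) ≤ x) {x.toNat} = ∅ := by
        rw [Finset.filter_singleton, if_neg (by omega)]
      rw [this]
      simp [hXx]
    · rw [pvF, if_neg h2, if_neg (by tauto), pvC_full x (by omega) hp, zero_add]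

theorem pvC_eq_list (r x : Int) (hx0 : 0 ≤ x) (hxr : x ≤ r) :
    ((PySem.List.pyRange 2 (PySem.Int.floordiv r 2 + 1) 1).map
      (fun p => if (p.toNat.Prime ∧ p ∣ x ∧ 2 * p ≤ x) then p else 0)).sum = pvC x := by
  set L := PySem.List.pyRange 2 (PySem.Int.floordiv r 2 + 1) 1 with hL
  set g : Int → Int := fun p => if (p.toNat.Prime ∧ p ∣ x ∧ 2 * p ≤ x) then p else 0 with hg
  set S := Finset.image (fun q : Nat => (q : Int))
    (Finset.filter (fun q : Nat => 2 * (q : Int) ≤ x) x.toNat.primeFactors) with hS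
  have hnd : L.Nodup := hL ▸ PySem.List.nodup_pyRange_one _ _
  have hsum1 : (L.map g).sum = ∑ p ∈ L.toFinset, g p := (List.sum_toFinset g hnd).symm
  have hSL : S ⊆ L.toFinset := by
    intro p hp
    rw [hS, Finset.mem_image] at hp
    obtain ⟨q, hqf, rfl⟩ := hp
    rw [Finset.mem_filter] at hqf
    obtain ⟨hqpf, hq2x⟩ := hqf
    obtain ⟨hqp, -, -⟩ := (pvMemPF x hx0 q).mp hqpf
    have h2q : (2 : Int) ≤ (q : Int) := by exact_mod_cast hqp.two_le
    rw [List.mem_toFinset, hL, PySem.List.mem_pyRange_one]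
    refine ⟨h2q, ?_⟩
    have : (q : Int) ≤ PySem.Int.floordiv r 2 :=
      (PySem.Int.le_floordiv_iff_mul_le (by omega)).mpr (by omega)
    omega
  have hzero : ∀ p ∈ L.toFinset, p ∉ S → g p = 0 := by
    intro p hpL hpS
    rw [hg]
    by_cases hc : p.toNat.Prime ∧ p ∣ x ∧ 2 * p ≤ x
    · exfalso
      obtain ⟨hc1, hc2, hc3⟩ := hc
      have hp0 : 0 ≤ p := by
        rw [List.mem_toFinset, hL, PySem.List.mem_pyRange_one] at hpL
        omega
      have hPp : ((p.toNat : Int)) = p := Int.toNat_of_nonneg hp0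
      have hp2 : 2 ≤ p := by have := hc1.two_le; omega
      apply hpS
      rw [hS, Finset.mem_image]
      refine ⟨p.toNat, ?_, hPp⟩
      rw [Finset.mem_filter]
      refine ⟨(pvMemPF x hx0 p.toNat).mpr ⟨hc1, hPp ▸ hc2, by omega⟩, ?_⟩
      rw [hPp]
      omega
    · simp only [if_neg hc]
  have hsub := Finset.sum_subset hSL hzero
  have himg : ∑ p ∈ S, g p
      = ∑ q ∈ Finset.filter (fun q : Nat => 2 * (q : Int) ≤ x) x.toNat.primeFactors, g ((q : Int)) := by
    rw [hS]
    exact Finset.sum_image (fun a _ b _ h => by exact_mod_cast h)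
  have hgq : ∀ q ∈ Finset.filter (fun q : Nat => 2 * (q : Int) ≤ x) x.toNat.primeFactors,
      g ((q : Int)) = (q : Int) := by
    intro q hqf
    rw [Finset.mem_filter] at hqf
    obtain ⟨hqpf, hq2x⟩ := hqf
    obtain ⟨hqp, hqd, -⟩ := (pvMemPF x hx0 q).mp hqpf
    simp only [hg, if_pos (show ((q : Int)).toNat.Prime ∧ (q : Int) ∣ x ∧ 2 * (q : Int) ≤ x from ⟨by simpa using hqp, hqd, hq2x⟩)]
  rw [hsum1, ← hsub, himg, Finset.sum_congr rfl hgq, pvC]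

theorem pvNotMarked_iff (k x : Int) (hx0 : 0 ≤ x) (hk : x - 1 ≤ k) :
    ¬ pvMarked k x ↔ (x < 2 ∨ x.toNat.Prime) := by
  constructor
  · intro hnm
    by_contra hc
    push_neg at hc
    exact hnm (pvMarked_compose x (by omega) hc.2 k (by omega))
  · rintro (h2 | hp)
    · have hpf : x.toNat.primeFactors = ∅ := by interval_cases x <;> simp
      rintro ⟨q, hmem, -⟩
      simp [hpf] at hmem
    · rintro ⟨q, hmem, -, hq2⟩
      rw [hp.primeFactors, Finset.mem_singleton] at hmem
      subst hmem
      have hXx : ((x.toNat : Int)) = x := Int.toNat_of_nonneg hx0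
      have h2 := hp.two_le
      omega

theorem pvMarkFoldB : ∀ (ms : List Int) (st : Array Bool),
    (∀ j ∈ ms, 0 ≤ j ∧ j < (st.size : Int)) →
    (ms.foldl pvMarkB st).size = st.size ∧
    (∀ x : Int, 0 ≤ x → x < (st.size : Int) →
      pvGetA (ms.foldl pvMarkB st) x = if x ∈ ms then some false else pvGetA st x) := by
  intro ms
  induction ms with
  | nil => intro st _; simp
  | cons y ys ih =>
    intro st hms
    have hy := hms y (List.mem_cons_self ..)
    have hsz1 : (pvMarkB st y).size = st.size := Array.size_setIfInBounds ..
    have hread : ∀ x : Int, 0 ≤ x → x < (st.size : Int) →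
        pvGetA (pvMarkB st y) x = if x = y then some false else pvGetA st x := by
      intro x hx0 hxlt
      rw [pvGetA_eq_getElem? _ x hx0 (by omega), pvGetA_eq_getElem? _ x hx0 hxlt]
      show (st.setIfInBounds y.toNat false)[x.toNat]? = _
      rw [Array.getElem?_setIfInBounds]
      by_cases hxy : x = y
      · subst hxy
        rw [if_pos rfl, if_pos (by omega), if_pos rfl]
      · rw [if_neg (by omega), if_neg hxy]
    obtain ⟨f1, fr⟩ := ih (pvMarkB st y) (by
      intro j hj
      have := hms j (List.mem_cons_of_mem _ hj)
      omega)
    refine ⟨by simp only [List.foldl_cons]; omega, ?_⟩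
    intro x hx0 hxlt
    simp only [List.foldl_cons]
    rw [fr x hx0 (by omega), hread x hx0 hxlt]
    by_cases hxy : x = y
    · subst hxy
      by_cases hxys : x ∈ ys <;> simp [hxys, List.mem_cons]
    · by_cases hxys : x ∈ ys <;> simp [hxys, hxy, List.mem_cons]

theorem pvSieveB_step (r i : Int) (h2 : 2 ≤ i) (hir : i ≤ r)
    (st : Array Bool) (hinv : pvSBInv r (i - 1) st) : pvSBInv r i (pvSieveB r st i) := by
  obtain ⟨sz, harr⟩ := hinv
  have hri : ((r + 1).toNat : Int) = r + 1 := Int.toNat_of_nonneg (by omega)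
  have hread := harr i (by omega) hir
  rw [pvMarked_iff_at_self i h2] at hread
  by_cases hp : i.toNat.Prime
  · have htrue : (pvGetA st i).getD false = true := hread.mpr (by simpa using hp)
    have hms : ∀ j ∈ PySem.List.pyRange (2 * i) (r + 1) i, 0 ≤ j ∧ j < (st.size : Int) := by
      intro j hj
      obtain ⟨hj1, hj2, -⟩ := (PySem.List.mem_pyRange_iff_of_pos (by omega) j).mp hj
      constructor <;> omega
    obtain ⟨f1, fr⟩ := pvMarkFoldB (PySem.List.pyRange (2 * i) (r + 1) i) st hms
    have hmem : ∀ x : Int, 0 ≤ x → x ≤ r →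
        (x ∈ PySem.List.pyRange (2 * i) (r + 1) i ↔ (i ∣ x ∧ 2 * i ≤ x)) := by
      intro x hx0 hxr
      rw [PySem.List.mem_pyRange_iff_of_pos (by omega) x]
      constructor
      · rintro ⟨ha, hb, hc⟩
        refine ⟨?_, ha⟩
        have h2i : i ∣ 2 * i := ⟨2, by ring⟩
        simpa using dvd_add hc h2i
      · rintro ⟨ha, hb⟩
        exact ⟨hb, by omega, by simpa using dvd_sub ha ⟨2, by ring⟩⟩
    rw [pvSieveB, if_pos htrue]
    refine ⟨by omega, ?_⟩
    intro x hx0 hxr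
    rw [fr x hx0 (by omega), pvMarked_succ i x h2 hx0 hp]
    by_cases hin : x ∈ PySem.List.pyRange (2 * i) (r + 1) i
    · simp only [hin, if_pos, Option.getD_some]
      constructor
      · intro h; exact absurd h (by simp)
      · intro h
        exact absurd (Or.inr ((hmem x hx0 hxr).mp hin)) h
    · rw [if_neg hin, harr x hx0 hxr]
      have : ¬ (i ∣ x ∧ 2 * i ≤ x) := fun h => hin ((hmem x hx0 hxr).mpr h)
      tauto
  · have hfalse : ¬ ((pvGetA st i).getD false = true) := fun h => by
      have := hread.mp h; simp_all
    rw [pvSieveB, if_neg (by simpa using hfalse)]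
    refine ⟨sz, ?_⟩
    intro x hx0 hxr
    rw [harr x hx0 hxr, pvMarked_not_prime i x h2 hx0 hp]

theorem pvSBInv_init (r : Int) : pvSBInv r 1 (Array.replicate (r + 1).toNat true) := by
  refine ⟨Array.size_replicate, ?_⟩
  intro x hx0 hxr
  have hlt : x < ((Array.replicate (r + 1).toNat true).size : Int) := by
    simp [Array.size_replicate]; omega
  rw [pvGetA_eq_getElem? _ x hx0 hlt]
  simp only [Array.getElem?_replicate]
  rw [if_pos (by simp [Array.size_replicate] at hlt; omega)]
  simp only [Option.getD_some, true_iff]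
  rintro ⟨q, hmem, hql, -⟩
  have hqp : q.Prime := ((pvMemPF x hx0 q).mp hmem).1
  have : (2 : Int) ≤ (q : Int) := by exact_mod_cast hqp.two_le
  omega

theorem pvSBInv_fold (r : Int) : ∀ (n : Nat) (k : Int), k = 1 + (n : Int) → k ≤ r →
    pvSBInv r k ((PySem.List.pyRange 2 (k + 1) 1).foldl (pvSieveB r)
      (Array.replicate (r + 1).toNat true)) := by
  intro n
  induction n with
  | zero =>
    intro k hk hkr
    subst hk
    rw [show ((1 : Int) + (0 : Nat) + 1) = 2 by norm_num, PySem.List.pyRange_one_eq_nil (by omega)]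
    simpa using pvSBInv_init r
  | succ n ih =>
    intro k hk hkr
    have hk1 : k - 1 = 1 + (n : Int) := by push_cast at hk ⊢; omega
    have h2k : 2 ≤ k := by push_cast at hk; omega
    rw [show k + 1 = (k - 1 + 1) + 1 by ring,
      PySem.List.pyRange_one_succ_right (by omega), List.foldl_append]
    simp only [List.foldl_cons, List.foldl_nil]
    rw [show k - 1 + 1 = k by ring]
    exact pvSieveB_step r k h2k hkr _ (by
      have := ih (k - 1) hk1 (by omega)
      rwa [show k - 1 + 1 = k by ring] at this)

-- ===== VERDICT (by name: the statement is the Claim_ definition above) =====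
theorem sumOfAll_spec : Claim_equal_sumOfAll := by
  unfold Claim_equal_sumOfAll
  intro l r _ hpre
  unfold Spec_sumOfAll sumOfAll sumOfAll_alt
  by_cases hlr : r < l
  · rw [if_pos hlr,
      show PySem.List.pyRange l (r + 1) 1 = [] from PySem.List.pyRange_one_eq_nil (by omega)]
    simp
  · rw [if_neg hlr]
    have hl0 : 0 ≤ l := by unfold Pre_sumOfAll at hpre; omega
    have hlr' : l ≤ r := by omega
    set st := (PySem.List.pyRange 2 (r + 1) 1).foldl (pvSieveA r)
      (Array.replicate (r + 1).toNat true, Array.replicate (r + 1).toNat ([] : List Int)) with hst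
    set sb := (PySem.List.pyRange 2 (r + 1) 1).foldl (pvSieveB r)
      (Array.replicate (r + 1).toNat true) with hsb
    have hinvA : ∃ k, r - 1 ≤ k ∧ pvSInv r k st := by
      by_cases h2r : 2 ≤ r
      · have hcast : (((r - 1).toNat : Int)) = r - 1 := Int.toNat_of_nonneg (by omega)
        exact ⟨r, by omega, hst ▸ pvSInv_fold r (r - 1).toNat r (by omega) (le_refl r)⟩
      · refine ⟨1, by omega, ?_⟩
        rw [hst, PySem.List.pyRange_one_eq_nil (by omega)]
        simpa using pvSInv_init r
    obtain ⟨k, hk, hinvA⟩ := hinvA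
    have hinvB : ∃ k2, r - 1 ≤ k2 ∧ pvSBInv r k2 sb := by
      by_cases h2r : 2 ≤ r
      · have hcast : (((r - 1).toNat : Int)) = r - 1 := Int.toNat_of_nonneg (by omega)
        exact ⟨r, by omega, hsb ▸ pvSBInv_fold r (r - 1).toNat r (by omega) (le_refl r)⟩
      · refine ⟨1, by omega, ?_⟩
        rw [hsb, PySem.List.pyRange_one_eq_nil (by omega)]
        simpa using pvSBInv_init r
    obtain ⟨k2, hk2, hinvB⟩ := hinvB
    obtain ⟨hsbsz, hsbarr⟩ := hinvB
    have hchar : ∀ x : Int, 0 ≤ x → x ≤ r →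
        ((pvGetA sb x).getD false = true ↔ (x < 2 ∨ x.toNat.Prime)) := by
      intro x hx0 hxr
      rw [hsbarr x hx0 hxr, pvNotMarked_iff k2 x hx0 (by omega)]
    -- A's output loop is the sum of pvF over the range
    have hA : (PySem.List.pyRange l (r + 1) 1).foldl
        (fun s i => if (pvGetA st.1 i).getD false then s + i
                    else s + (pvDGet st.2 i).sum) 0
        = ((PySem.List.pyRange l (r + 1) 1).map pvF).sum := by
      rw [PySem.List.foldl_congr_mem _ _
        (fun s i => s + (if (pvGetA st.1 i).getD false then i else (pvDGet st.2 i).sum)) _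
        (by intro acc x _; by_cases hc : (pvGetA st.1 x).getD false <;> simp [hc]),
        PySem.List.foldl_add, zero_add]
      apply congrArg List.sum
      apply List.map_congr_left
      intro x hxm
      obtain ⟨hx1, hx2⟩ := PySem.List.mem_pyRange_one.mp hxm
      exact pvA_summand r k st hinvA hk x (by omega) (by omega)
    -- B's first loop is the prime/small part
    have eB1 : (PySem.List.pyRange l (r + 1) 1).foldl
        (fun t n => if n < 2 || (pvGetA sb n).getD false then t + n else t) 0
        = 0 + ((PySem.List.pyRange l (r + 1) 1).map
            (fun n => if n < 2 ∨ n.toNat.Prime then n else 0)).sum := by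
      rw [PySem.List.foldl_congr_mem _ _
        (fun t n => t + (if n < 2 ∨ n.toNat.Prime then n else 0)) _ ?_]
      · exact PySem.List.foldl_add _ _ _
      · intro acc x hx
        obtain ⟨hx1, hx2⟩ := PySem.List.mem_pyRange_one.mp hx
        have hgd := hchar x (by omega) (by omega)
        by_cases hc : x < 2 ∨ x.toNat.Prime
        · have hcb : (decide (x < 2) || (pvGetA sb x).getD false) = true := by
            rcases hc with h | h
            · simp [h]
            · simp [hgd.mpr (Or.inr h)]
          rw [if_pos hcb]
          show acc + x = acc + (if x < 2 ∨ x.toNat.Prime then x else 0)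
          rw [if_pos hc]
        · have hcb : ¬ ((decide (x < 2) || (pvGetA sb x).getD false) = true) := by
            simp only [Bool.or_eq_true, decide_eq_true_eq]
            rintro (h | h)
            · exact hc (Or.inl h)
            · exact hc (hgd.mp h)
          rw [if_neg hcb]
          show acc = acc + (if x < 2 ∨ x.toNat.Prime then x else 0)
          rw [if_neg hc, add_zero]
    -- B's second loop adds each prime's term
    have eB2 : ∀ t0 : Int, (PySem.List.pyRange 2 (PySem.Int.floordiv r 2 + 1) 1).foldl
        (fun t p => if (pvGetA sb p).getD false then
            t + p * (PySem.Int.floordiv r p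
              - PySem.Int.floordiv ((if 2 * p > l then 2 * p else l) - 1) p)
          else t) t0
        = t0 + ((PySem.List.pyRange 2 (PySem.Int.floordiv r 2 + 1) 1).map
            (fun p => if (pvGetA sb p).getD false then
              p * (PySem.Int.floordiv r p
                - PySem.Int.floordiv ((if 2 * p > l then 2 * p else l) - 1) p)
              else 0)).sum := by
      intro t0
      rw [PySem.List.foldl_congr_mem _ _
        (fun t p => t + (if (pvGetA sb p).getD false then
            p * (PySem.Int.floordiv r p
              - PySem.Int.floordiv ((if 2 * p > l then 2 * p else l) - 1) p)
            else 0)) _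
        (by intro acc x _; by_cases hc : (pvGetA sb x).getD false <;> simp [hc])]
      exact PySem.List.foldl_add _ _ _
    -- each prime term is the inner sum over the range
    have ePer : ∀ p ∈ PySem.List.pyRange 2 (PySem.Int.floordiv r 2 + 1) 1,
        (if (pvGetA sb p).getD false then
          p * (PySem.Int.floordiv r p
            - PySem.Int.floordiv ((if 2 * p > l then 2 * p else l) - 1) p)
          else 0)
        = ((PySem.List.pyRange l (r + 1) 1).map
            (fun n => if (p.toNat.Prime ∧ p ∣ n ∧ 2 * p ≤ n) then p else 0)).sum := by
      intro p hp
      obtain ⟨hp2, hplt⟩ := PySem.List.mem_pyRange_one.mp hp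
      have h2pr : 2 * p ≤ r := by
        have h1 : p ≤ PySem.Int.floordiv r 2 := by omega
        have := (PySem.Int.le_floordiv_iff_mul_le (by omega : (0 : Int) < 2)).mp h1
        omega
      have hcp := hchar p (by omega) (by omega)
      by_cases hprime : p.toNat.Prime
      · have hg : (pvGetA sb p).getD false = true := hcp.mpr (Or.inr hprime)
        rw [if_pos hg, PySem.Int.floordiv_eq_ediv_of_pos (show (0 : Int) < p by omega),
          PySem.Int.floordiv_eq_ediv_of_pos (show (0 : Int) < p by omega),
          ← pvPrimeTerm p l r hp2 h2pr hl0 hlr']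
        apply congrArg List.sum
        apply List.map_congr_left
        intro n _
        by_cases hd : p ∣ n ∧ 2 * p ≤ n
        · rw [if_pos hd, if_pos ⟨hprime, hd.1, hd.2⟩]
        · rw [if_neg hd, if_neg (fun h => hd ⟨h.2.1, h.2.2⟩)]
      · have hg : ¬ ((pvGetA sb p).getD false = true) := by
          rw [hcp]
          rintro (h | h)
          · omega
          · exact hprime h
        rw [if_neg (by simpa using hg)]
        symm
        rw [List.map_congr_left
          (fun n _ => if_neg (fun h => hprime h.1) :
            ∀ n ∈ PySem.List.pyRange l (r + 1) 1,
              (if (p.toNat.Prime ∧ p ∣ n ∧ 2 * p ≤ n) then p else 0) = 0)]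
        simp
    rw [hA]
    have hB : (PySem.List.pyRange 2 (PySem.Int.floordiv r 2 + 1) 1).foldl
        (fun t p => if (pvGetA sb p).getD false then
            t + p * (PySem.Int.floordiv r p
              - PySem.Int.floordiv ((if 2 * p > l then 2 * p else l) - 1) p)
          else t)
        ((PySem.List.pyRange l (r + 1) 1).foldl
          (fun t n => if n < 2 || (pvGetA sb n).getD false then t + n else t) 0)
        = ((PySem.List.pyRange l (r + 1) 1).map pvF).sum := by
      rw [eB1, eB2, List.map_congr_left ePer,
        ← pvSumSwap (PySem.List.pyRange l (r + 1) 1)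
          (PySem.List.pyRange 2 (PySem.Int.floordiv r 2 + 1) 1)
          (fun p n => if (p.toNat.Prime ∧ p ∣ n ∧ 2 * p ≤ n) then p else 0),
        zero_add, ← PySem.List.sum_map_add_int]
      apply congrArg List.sum
      apply List.map_congr_left
      intro n hn
      obtain ⟨hn1, hn2⟩ := PySem.List.mem_pyRange_one.mp hn
      rw [pvC_eq_list r n (by omega) (by omega)]
      exact (pvF_split n (by omega)).symm
    exact hB.symm
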